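-- pv_equiv track=rewrite | github.com/bokamix/jede-brain | tools/scripts/yt_finder.py | parse_views
-- ===== SOURCE A (Python) =====
-- def parse_views(view_str):
--     """Konwertuje string z liczbą wyświetleń na int."""
--     if not view_str:
--         return 0
--     # Usuń wszystko co nie jest cyfrą (w tym spacje, 'wyświetleń' itp.)
--     clean_str = ''.join(c for c in view_str if c.isdigit())
--     try:
--         return int(clean_str)
--     except ValueError:
--         return 0
-- ===== SOURCE B (Python) =====
-- def parse_views(view_str):
--     """Konwertuje string z liczbą wyświetleń na int."""
--     if not view_str:
--         return 0
--     result = 0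
--     for c in view_str:
--         if c.isdigit():
--             result = result * 10 + int(c)
--     return result
-- ===== Notes on version B (the rewrite author's own statement) =====
-- stated objective: simpler
-- what changed: B drops the filtered-string build and the int()/try-except: it keeps a single numeric accumulator and folds each digit in with Horner's rule (result = result*10 + digit) in one pass, returning 0 naturally when no digit occurs.
import Mathlib
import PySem

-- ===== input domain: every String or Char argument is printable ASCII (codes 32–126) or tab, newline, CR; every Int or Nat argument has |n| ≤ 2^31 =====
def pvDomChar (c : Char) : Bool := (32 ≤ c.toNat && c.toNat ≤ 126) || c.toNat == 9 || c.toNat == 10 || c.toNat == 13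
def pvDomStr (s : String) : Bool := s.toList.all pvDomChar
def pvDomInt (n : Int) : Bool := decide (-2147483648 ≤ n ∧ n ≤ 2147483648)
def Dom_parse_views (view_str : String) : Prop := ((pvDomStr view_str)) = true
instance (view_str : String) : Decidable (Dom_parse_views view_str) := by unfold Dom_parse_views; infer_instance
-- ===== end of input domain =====

-- B replaces the filtered-string build + int() with a one-pass Horner accumulator (objective: simpler).

-- ===== PORT A =====
def parse_views (view_str : String) : Int :=
  if view_str = "" then 0
  else
    -- clean_str = ''.join(c for c in view_str if c.isdigit())
    let clean : List Char := view_str.toList.filter PySem.Chars.isdigit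
    -- int(clean_str) ported by hand: clean contains only ASCII digits '0'-'9', on which
    -- int() is exactly the decimal fold below; int('') raises ValueError -> except returns 0
    match clean with
    | [] => 0
    | ds => ds.foldl (fun a c => a * 10 + ((c.toNat : Int) - 48)) 0

-- ===== PORT B =====
def parse_views_alt (view_str : String) : Int :=
  if view_str = "" then 0
  else
    view_str.toList.foldl
      (fun r c => if PySem.Chars.isdigit c then r * 10 + ((c.toNat : Int) - 48) else r) 0

-- ===== PRECONDITION & SPEC =====
def Spec_parse_views (view_str : String) (out : Int) : Prop := out = parse_views_alt view_str
instance (view_str : String) (out : Int) : Decidable (Spec_parse_views view_str out) := by unfold Spec_parse_views; infer_instance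

-- ===== CLAIM (what is proved, stated in full; the proofs are below) =====
def Claim_equal_parse_views : Prop := ∀ (view_str : String), Dom_parse_views view_str → Spec_parse_views view_str (parse_views view_str)

-- ===== LEMMAS AND PROOFS =====
theorem fold_if_eq_fold_filter (cs : List Char) (acc : Int) :
    cs.foldl (fun r c => if PySem.Chars.isdigit c then r * 10 + ((c.toNat : Int) - 48) else r) acc
      = (cs.filter PySem.Chars.isdigit).foldl (fun a c => a * 10 + ((c.toNat : Int) - 48)) acc := by
  induction cs generalizing acc with
  | nil => rfl
  | cons c cs ih =>
      simp only [List.foldl_cons, List.filter_cons]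
      by_cases h : PySem.Chars.isdigit c
      · simp [h, ih]
      · simp [h, ih]

-- ===== VERDICT (by name: the statement is the Claim_ definition above) =====
theorem parse_views_spec : Claim_equal_parse_views := by
  intro s _
  unfold Spec_parse_views parse_views parse_views_alt
  by_cases hs : s = ""
  · simp [hs]
  · simp only [hs, if_false]
    rw [fold_if_eq_fold_filter]
    cases h : s.toList.filter PySem.Chars.isdigit with
    | nil => simp [h]
    | cons d ds => simp [h]
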